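-- pv_equiv track=rewrite | github.com/neharathi968/DSA-mini | backend/kmap.py | minterms_to_literal
-- ===== SOURCE A (Python) =====
-- from typing import List, Tuple, Set, Dict, Optional
--
-- def minterms_to_literal(minterms: Set[int], vars_list: List[str]) -> str:
--     n = len(vars_list)
--     bits_list = [format(m, f'0{n}b') for m in sorted(minterms)]
--     common = []
--     for pos in range(n):
--         col = [b[pos] for b in bits_list]
--         if all(x == col[0] for x in col):
--             common.append(col[0])
--         else:
--             common.append('-')
--     parts = []
--     for bit, var in zip(common, vars_list):
--         if bit == '1':
--             parts.append(var)
--         elif bit == '0':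
--             parts.append(f'~{var}')
--     if not parts:
--         return "1"
--     return " & ".join(parts)
-- ===== SOURCE B (Python) =====
-- def minterms_to_literal(minterms, vars_list):
--     n = len(vars_list)
--     common = None
--     for m in minterms:
--         bits = format(m, f'0{n}b')[:n]
--         if common is None:
--             common = list(bits)
--         else:
--             common = [c if c == x else '-' for c, x in zip(common, bits)]
--     parts = [v if c == '1' else '~' + v
--              for c, v in zip(common, vars_list) if c in ('0', '1')]
--     return " & ".join(parts) if parts else "1"
-- ===== Notes on version B (the rewrite author's own statement) =====
-- stated objective: faster
-- what changed: A scans the minterm list once per variable position (building a column and checking it is constant); B makes a single pass over the minterms, folding each bit pattern into a running common pattern that degrades to '-' where patterns disagree, and drops A's sort entirely (the result is order-independent).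
-- outside the precondition, e.g. on minterms_to_literal(set(), []): A returns '1', B raises TypeError
import Mathlib
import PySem

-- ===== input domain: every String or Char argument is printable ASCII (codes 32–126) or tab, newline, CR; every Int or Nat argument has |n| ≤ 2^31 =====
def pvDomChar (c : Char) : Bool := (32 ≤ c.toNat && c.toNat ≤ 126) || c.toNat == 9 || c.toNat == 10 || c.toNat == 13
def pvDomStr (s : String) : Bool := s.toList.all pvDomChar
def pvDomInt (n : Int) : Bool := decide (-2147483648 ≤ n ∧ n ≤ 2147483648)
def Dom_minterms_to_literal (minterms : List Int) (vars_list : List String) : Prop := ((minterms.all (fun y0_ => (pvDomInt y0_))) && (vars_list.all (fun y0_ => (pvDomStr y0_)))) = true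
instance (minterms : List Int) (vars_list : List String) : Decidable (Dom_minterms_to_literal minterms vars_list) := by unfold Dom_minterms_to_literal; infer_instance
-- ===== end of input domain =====

-- B replaces A's column-by-column scan (one pass over all minterms per variable position)
-- by a single fold over the minterms that degrades a running pattern; same result, one pass.

-- shared helper: Python's format(m, f'0{n}b') (sign-magnitude binary, zero-padded to total
-- width n, the sign counting toward the width); both Pythons call format, so both ports use it.
def pvNatBinAux : Nat → List Char → List Char
  | 0, acc => acc
  | (k+1), acc => pvNatBinAux ((k+1)/2) ((if (k+1) % 2 = 1 then '1' else '0') :: acc)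
  decreasing_by exact Nat.div_lt_self (Nat.succ_pos k) (by norm_num)

-- bin(k) without the '0b' prefix; bin(0) = "0"
def pvNatBin (k : Nat) : List Char := if k = 0 then ['0'] else pvNatBinAux k []

def pvPadZeros (w : Nat) (cs : List Char) : List Char :=
  List.replicate (w - cs.length) '0' ++ cs

def pyFormatB (m : Int) (n : Nat) : List Char :=
  if m < 0 then '-' :: pvPadZeros (n - 1) (pvNatBin (-m).toNat)
  else pvPadZeros n (pvNatBin m.toNat)

-- ===== PORT A =====
def minterms_to_literal (minterms : List Int) (vars_list : List String) : String :=
  let n := vars_list.length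
  let bits_list := (PySem.List.sorted minterms (fun x => x)).map (fun m => pyFormatB m n)
  let common := (PySem.List.pyRange 0 (n : Int) 1).foldl (fun acc pos =>
    -- col = [b[pos] for b in bits_list]; b[pos] is exact as getD: 0 ≤ pos < n ≤ b.length
    let col := bits_list.map (fun b => b.getD pos.toNat ' ')
    -- all(x == col[0] for x in col); col[0] raises IndexError iff minterms = [] (excluded by Pre_)
    if col.all (fun x => x == col.headD ' ') then acc ++ [col.headD ' ']
    else acc ++ ['-']) ([] : List Char)
  let parts := (common.zip vars_list).foldl (fun acc p =>
    if p.1 == '1' then acc ++ [p.2]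
    else if p.1 == '0' then acc ++ ["~" ++ p.2]
    else acc) ([] : List String)
  if parts.isEmpty then "1" else PySem.Str.join " & " parts

-- ===== PORT B =====
def minterms_to_literal_alt (minterms : List Int) (vars_list : List String) : String :=
  let n := vars_list.length
  let common : Option (List Char) := minterms.foldl (fun acc m =>
    let bits := PySem.List.slice (pyFormatB m n) none (some (n : Int))   -- format(...)[:n]
    match acc with
    | none => some bits
    | some c => some (List.zipWith (fun a b => if a = b then a else '-') c bits)) none
  match common with
  | none => ""   -- Python B raises TypeError on empty minterms (excluded by Pre_)
  | some c =>
    let parts := (c.zip vars_list).filterMap (fun p =>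
      if p.1 = '0' ∨ p.1 = '1' then some (if p.1 = '1' then p.2 else "~" ++ p.2) else none)
    if parts.isEmpty then "1" else PySem.Str.join " & " parts

-- ===== PRECONDITION & SPEC =====
-- Pre_ excludes exactly the empty minterm set: there A raises IndexError whenever vars_list is
-- nonempty (and returns "1" only in the degenerate all-empty case), and B raises TypeError.
def Pre_minterms_to_literal (minterms : List Int) (vars_list : List String) : Prop :=
  minterms ≠ []
instance (minterms : List Int) (vars_list : List String) : Decidable (Pre_minterms_to_literal minterms vars_list) := by unfold Pre_minterms_to_literal; infer_instance

def pvWitness_minterms_to_literal : List Int × List String := ([1, 3], ["a", "b"])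

def Spec_minterms_to_literal (minterms : List Int) (vars_list : List String) (out : String) : Prop := out = minterms_to_literal_alt minterms vars_list
instance (minterms : List Int) (vars_list : List String) (out : String) : Decidable (Spec_minterms_to_literal minterms vars_list out) := by unfold Spec_minterms_to_literal; infer_instance

-- ===== CLAIM (what is proved, stated in full; the proofs are below) =====
def Claim_equal_minterms_to_literal : Prop := ∀ (minterms : List Int) (vars_list : List String), Dom_minterms_to_literal minterms vars_list → Pre_minterms_to_literal minterms vars_list → Spec_minterms_to_literal minterms vars_list (minterms_to_literal minterms vars_list)

-- ===== LEMMAS AND PROOFS =====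
theorem pvFoldDash (bs : List Char) :
    bs.foldl (fun a b => if a = b then a else '-') '-' = '-' := by
  induction bs with
  | nil => rfl
  | cons b bs ih => simp only [List.foldl_cons]; split_ifs <;> exact ih

theorem pvCharFold (bs : List Char) (c : Char) :
    bs.foldl (fun a b => if a = b then a else '-') c
      = if bs.all (fun b => b == c) then c else '-' := by
  induction bs generalizing c with
  | nil => simp
  | cons b bs ih =>
    simp only [List.foldl_cons, List.all_cons]
    by_cases h : c = b
    · subst h; simp [ih]
    · have hbc : (b == c) = false := by simp [Ne.symm h]
      simp [if_neg h, pvFoldDash, hbc]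

theorem pvLen_pyFormatB (m : Int) (n : Nat) : n ≤ (pyFormatB m n).length := by
  unfold pyFormatB pvPadZeros
  split_ifs <;> simp <;> omega

theorem pvGetD_take {α : Type} (xs : List α) (n pos : Nat) (d : α) (h : pos < n) :
    (xs.take n).getD pos d = xs.getD pos d := by
  simp [List.getD, h]

theorem pvLen_bitsF (m : Int) (n : Nat) : ((pyFormatB m n).take n).length = n := by
  simp [pvLen_pyFormatB]


theorem pvOptFold (n : Nat) (rest : List Int) (c : List Char) :
    rest.foldl (fun acc m =>
      let bits := (pyFormatB m n).take n
      match acc with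
      | none => some bits
      | some c => some (List.zipWith (fun a b => if a = b then a else '-') c bits)) (some c)
    = some (rest.foldl (fun c m =>
        List.zipWith (fun a b => if a = b then a else '-') c ((pyFormatB m n).take n)) c) := by
  induction rest generalizing c with
  | nil => rfl
  | cons m rest ih => simp only [List.foldl_cons]; exact ih _

theorem pvFoldCLen (n : Nat) (rest : List Int) (c : List Char) (hc : c.length = n) :
    (rest.foldl (fun c m =>
        List.zipWith (fun a b => if a = b then a else '-') c ((pyFormatB m n).take n)) c).length = n := by
  induction rest generalizing c with
  | nil => exact hc
  | cons m rest ih =>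
    simp only [List.foldl_cons]
    exact ih _ (by simp only [List.length_zipWith, pvLen_bitsF, hc, Nat.min_self])

theorem pvFoldCGet (n : Nat) (rest : List Int) (c : List Char) (pos : Nat)
    (hc : c.length = n) (hp : pos < n) :
    (rest.foldl (fun c m =>
        List.zipWith (fun a b => if a = b then a else '-') c ((pyFormatB m n).take n)) c).getD pos ' '
    = (rest.map (fun m => ((pyFormatB m n).take n).getD pos ' ')).foldl
        (fun a b => if a = b then a else '-') (c.getD pos ' ') := by
  induction rest generalizing c with
  | nil => rfl
  | cons m rest ih =>
    simp only [List.foldl_cons, List.map_cons]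
    rw [ih _ (by simp only [List.length_zipWith, pvLen_bitsF, hc, Nat.min_self])]
    congr 1
    have h1 : pos < c.length := by omega
    have h2 : pos < ((pyFormatB m n).take n).length := by rw [pvLen_bitsF]; omega
    have h2' := pvLen_pyFormatB m n
    have h3 : pos < (List.zipWith (fun a b => if a = b then a else '-') c ((pyFormatB m n).take n)).length := by
      simp only [List.length_zipWith]; omega
    rw [List.getD_eq_getElem _ _ h3, List.getD_eq_getElem _ _ h1, List.getD_eq_getElem _ _ h2,
        List.getElem_zipWith]

theorem pvAllCongr {α β : Type} [BEq β] [LawfulBEq β] (f : α → β) (l1 l2 : List α)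
    (h : ∀ x, x ∈ l1 ↔ x ∈ l2) (a1 a2 : α) (h1 : a1 ∈ l1) (h2 : a2 ∈ l2) :
    (l1.all (fun x => f x == f a1)) = (l2.all (fun x => f x == f a2)) ∧
    ((l1.all (fun x => f x == f a1)) = true → f a1 = f a2) := by
  constructor
  · by_cases hA : (l1.all (fun x => f x == f a1)) = true
    · rw [hA]; symm
      rw [List.all_eq_true] at hA ⊢
      have ha2 : f a2 = f a1 := by simpa using hA a2 ((h a2).mpr h2)
      intro x hx
      have := hA x ((h x).mpr hx)
      simp at this ⊢; rw [this, ha2]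
    · by_cases hB : (l2.all (fun x => f x == f a2)) = true
      · exfalso; apply hA
        rw [List.all_eq_true] at hB ⊢
        have ha1 : f a1 = f a2 := by simpa using hB a1 ((h a1).mp h1)
        intro x hx
        have := hB x ((h x).mp hx)
        simp at this ⊢; rw [this, ha1]
      · simp only [Bool.not_eq_true] at hA hB; rw [hA, hB]
  · intro hA
    rw [List.all_eq_true] at hA
    have := hA a2 ((h a2).mpr h2)
    exact (by simpa using this : f a2 = f a1).symm

theorem pvParts (l : List (Char × String)) (acc : List String) :
    l.foldl (fun acc p =>
      if p.1 == '1' then acc ++ [p.2]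
      else if p.1 == '0' then acc ++ ["~" ++ p.2]
      else acc) acc
    = acc ++ l.filterMap (fun p =>
        if p.1 = '0' ∨ p.1 = '1' then some (if p.1 = '1' then p.2 else "~" ++ p.2) else none) := by
  induction l generalizing acc with
  | nil => simp
  | cons p l ih =>
    simp only [List.foldl_cons, List.filterMap_cons, ih]
    by_cases h1 : p.1 = '1'
    · simp [h1]
    · by_cases h0 : p.1 = '0'
      · simp [h0]
      · simp [h0, h1]

theorem pvCommonB_get (m0 : Int) (rest : List Int) (n pos : Nat) (hp : pos < n) :
    (rest.foldl (fun c m =>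
        List.zipWith (fun a b => if a = b then a else '-') c ((pyFormatB m n).take n))
        ((pyFormatB m0 n).take n)).getD pos ' '
    = if (m0 :: rest).all (fun m => (pyFormatB m n).getD pos ' ' == (pyFormatB m0 n).getD pos ' ')
      then (pyFormatB m0 n).getD pos ' ' else '-' := by
  rw [pvFoldCGet n rest _ pos (pvLen_bitsF m0 n) hp, pvCharFold]
  rw [List.all_map]
  simp only [Function.comp_def, pvGetD_take _ _ _ _ hp]
  simp [List.all_cons]

theorem pvCommonA_get (m0 : Int) (rest : List Int) (n pos : Nat) :
    (let bits_list := (PySem.List.sorted (m0 :: rest) (fun x => x)).map (fun m => pyFormatB m n)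
     let col := bits_list.map (fun b => b.getD pos ' ')
     if col.all (fun x => x == col.headD ' ') then col.headD ' ' else '-')
    = if (m0 :: rest).all (fun m => (pyFormatB m n).getD pos ' ' == (pyFormatB m0 n).getD pos ' ')
      then (pyFormatB m0 n).getD pos ' ' else '-' := by
  obtain ⟨s0, st, hs⟩ : ∃ a l, PySem.List.sorted (m0 :: rest) (fun x => x) = a :: l := by
    rcases h : PySem.List.sorted (m0 :: rest) (fun (x : Int) => x) with _ | ⟨a, l⟩
    · exact absurd ((PySem.List.sorted_eq_nil_iff _ _ _).mp h) (by simp)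
    · exact ⟨a, l, rfl⟩
  simp only [hs, List.map_cons, List.headD_cons, List.all_cons, List.all_map, Function.comp_def]
  have hmem : ∀ x, x ∈ s0 :: st ↔ x ∈ m0 :: rest := by
    intro x; rw [← hs]; exact PySem.List.mem_sorted _ _ _ x
  have hs0 : s0 ∈ s0 :: st := by simp
  have hm0 : m0 ∈ m0 :: rest := by simp
  obtain ⟨hall, hval⟩ := pvAllCongr (fun m => (pyFormatB m n).getD pos ' ')
    (s0 :: st) (m0 :: rest) hmem s0 m0 hs0 hm0
  simp only [List.all_cons] at hall
  simp only [hall]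
  split_ifs with h
  · exact hval (by simp only [List.all_cons]; rw [hall]; exact h)
  · rfl


theorem pvFoldlIfAppend {α β : Type} (l : List α) (c : α → Bool) (f g : α → β) (acc : List β) :
    l.foldl (fun acc x => if c x then acc ++ [f x] else acc ++ [g x]) acc
    = acc ++ l.map (fun x => if c x then f x else g x) := by
  induction l generalizing acc with
  | nil => simp
  | cons x l ih =>
    simp only [List.foldl_cons, List.map_cons]
    by_cases h : c x = true
    · simp [h, ih]
    · simp [h, ih]

-- ===== VERDICT (by name: the statement is the Claim_ definition above) =====
theorem minterms_to_literal_spec : Claim_equal_minterms_to_literal := by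
  intro minterms vars_list _ hpre
  obtain ⟨m0, rest, rfl⟩ := List.exists_cons_of_ne_nil hpre
  unfold Spec_minterms_to_literal minterms_to_literal minterms_to_literal_alt
  simp only [PySem.List.slice_to_natCast, List.foldl_cons]
  rw [pvOptFold]
  -- the two common patterns are equal
  have hcomm :
      (PySem.List.pyRange 0 (vars_list.length : Int) 1).foldl (fun acc pos =>
        let col := ((PySem.List.sorted (m0 :: rest) (fun x => x)).map
          (fun m => pyFormatB m vars_list.length)).map (fun b => b.getD pos.toNat ' ')
        if col.all (fun x => x == col.headD ' ') then acc ++ [col.headD ' ']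
        else acc ++ ['-']) ([] : List Char)
      = rest.foldl (fun c m =>
          List.zipWith (fun a b => if a = b then a else '-') c
            ((pyFormatB m vars_list.length).take vars_list.length))
          ((pyFormatB m0 vars_list.length).take vars_list.length) := by
    set n := vars_list.length with hn
    rw [PySem.List.pyRange_zero_nat, List.foldl_map, pvFoldlIfAppend]
    apply List.ext_getElem
    · simp [pvFoldCLen n rest _ (pvLen_bitsF m0 n)]
    · intro pos h1 h2
      simp only [List.nil_append, List.length_map, List.length_range] at h1
      simp only [List.nil_append] at h2 ⊢
      rw [List.getElem_map, List.getElem_range]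
      rw [← List.getD_eq_getElem _ ' ' h2, pvCommonB_get m0 rest n pos h1]
      have := pvCommonA_get m0 rest n pos
      simp only [Int.toNat_natCast]
      exact this
  rw [hcomm, pvParts, List.nil_append]
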